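-- pv_equiv track=rewrite | github.com/MKovacik/adventofcode2025 | Day10/d10_01_app.py | apply_buttons
-- ===== SOURCE A (Python) =====
-- def apply_buttons(num_lights, buttons, button_presses):
--     state = [0] * num_lights
--     for i, pressed in enumerate(button_presses):
--         if pressed:
--             for idx in buttons[i]:
--                 if idx < num_lights:
--                     state[idx] ^= 1
--     return state
-- ===== SOURCE B (Python) =====
-- def apply_buttons(num_lights, buttons, button_presses):
--     toggled = [idx for button, pressed in zip(buttons, button_presses) if pressed
--                for idx in button]
--     return [toggled.count(i) % 2 for i in range(num_lights)]
-- ===== Notes on version B (the rewrite author's own statement) =====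
-- stated objective: simpler
-- what changed: A mutates a state list in place, XOR-toggling state[idx] while scanning pressed buttons; B flattens the pressed buttons' indices once and then, per light, emits the parity of that index's occurrence count, with no mutable state; Pre_ excludes only inputs where A raises IndexError (a pressed position beyond buttons, or an index below -num_lights).
-- intended difference: On inputs where some pressed button holds a negative index idx with -num_lights <= idx < 0, A wraps it via Python negative indexing and toggles light idx+num_lights, while B leaves every light untouched by out-of-range indices, which is the intended reading of a light index list. — e.g. on apply_buttons(2, [[-1]], [true]): A returns [0, 1], B returns [0, 0]
import Mathlib
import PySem

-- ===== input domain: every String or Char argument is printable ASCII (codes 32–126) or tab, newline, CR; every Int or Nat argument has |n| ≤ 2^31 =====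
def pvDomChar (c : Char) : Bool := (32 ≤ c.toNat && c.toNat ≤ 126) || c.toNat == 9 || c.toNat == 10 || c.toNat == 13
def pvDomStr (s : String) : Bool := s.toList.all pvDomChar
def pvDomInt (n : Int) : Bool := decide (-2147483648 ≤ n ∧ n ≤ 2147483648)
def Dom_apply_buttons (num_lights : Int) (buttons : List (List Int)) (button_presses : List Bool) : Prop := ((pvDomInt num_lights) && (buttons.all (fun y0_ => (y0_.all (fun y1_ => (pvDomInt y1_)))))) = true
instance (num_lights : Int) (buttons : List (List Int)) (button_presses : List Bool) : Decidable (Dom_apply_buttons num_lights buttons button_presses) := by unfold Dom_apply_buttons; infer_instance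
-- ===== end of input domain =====

-- B replaces A's in-place XOR scan by flattening the pressed buttons' indices and emitting each light's
-- occurrence-count parity; B intentionally ignores negative indices that A wraps (see D_ below).

-- ===== PORT A =====
-- one toggle event: state[idx] ^= 1 guarded by idx < num_lights
def pvStepA (num_lights : Int) (st : List Int) (idx : Int) : List Int :=
  if idx < num_lights then
    PySem.List.pySetD st idx (PySem.Int.bxor (PySem.List.pyGetD st idx 0) 1)
  else st

def apply_buttons (num_lights : Int) (buttons : List (List Int)) (button_presses : List Bool) : List Int :=
  (PySem.List.enumerate button_presses 0).foldl
    (fun st p => if p.2 then (PySem.List.pyGetD buttons p.1 []).foldl (pvStepA num_lights) st else st)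
    (List.replicate num_lights.toNat 0)

-- ===== PORT B =====
def apply_buttons_alt (num_lights : Int) (buttons : List (List Int)) (button_presses : List Bool) : List Int :=
  let toggled := ((buttons.zip button_presses).filter (fun q => q.2)).flatMap (fun q => q.1)
  (PySem.List.pyRange 0 num_lights 1).map (fun i => PySem.Int.mod (PySem.List.count toggled i) 2)

-- ===== PRECONDITION & SPEC =====
-- Pre_ excludes exactly the inputs on which A raises: a pressed i with buttons[i] out of range
-- (IndexError on buttons[i]) or a guarded idx with idx < -num_lights (IndexError on state[idx]).
def Pre_apply_buttons (num_lights : Int) (buttons : List (List Int)) (button_presses : List Bool) : Prop :=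
  ∀ p ∈ PySem.List.enumerate button_presses 0, p.2 = true →
    p.1 < (buttons.length : Int) ∧
    ∀ idx ∈ PySem.List.pyGetD buttons p.1 [], idx < num_lights → -num_lights ≤ idx

instance (num_lights : Int) (buttons : List (List Int)) (button_presses : List Bool) : Decidable (Pre_apply_buttons num_lights buttons button_presses) := by unfold Pre_apply_buttons; infer_instance

def pvWitness_apply_buttons : Int × List (List Int) × List Bool := (3, [[0, 2], [1, 5]], [true, true])

-- On inputs where some pressed button holds a negative index idx with -num_lights ≤ idx < 0, A wraps it
-- via Python negative indexing and toggles light idx+num_lights, while B leaves every light untouched by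
-- out-of-range indices, the intended reading of a light index list.
def D_apply_buttons (num_lights : Int) (buttons : List (List Int)) (button_presses : List Bool) : Prop :=
  ∃ p ∈ PySem.List.enumerate button_presses 0, p.2 = true ∧
    ∃ idx ∈ PySem.List.pyGetD buttons p.1 [], idx < 0 ∧ -num_lights ≤ idx

instance (num_lights : Int) (buttons : List (List Int)) (button_presses : List Bool) : Decidable (D_apply_buttons num_lights buttons button_presses) := by unfold D_apply_buttons; infer_instance

def Spec_apply_buttons (num_lights : Int) (buttons : List (List Int)) (button_presses : List Bool) (out : List Int) : Prop := ¬ D_apply_buttons num_lights buttons button_presses → out = apply_buttons_alt num_lights buttons button_presses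
instance (num_lights : Int) (buttons : List (List Int)) (button_presses : List Bool) (out : List Int) : Decidable (Spec_apply_buttons num_lights buttons button_presses out) := by unfold Spec_apply_buttons; infer_instance

def pvDiffWitness_apply_buttons : Int × List (List Int) × List Bool := (2, [[-1]], [true])
def pvDiffWitnessOut_apply_buttons : (List Int) × (List Int) := ([0, 1], [0, 0])

-- ===== CLAIM (what is proved, stated in full; the proofs are below) =====
def Claim_unchanged_apply_buttons : Prop := ∀ (num_lights : Int) (buttons : List (List Int)) (button_presses : List Bool), Dom_apply_buttons num_lights buttons button_presses → Pre_apply_buttons num_lights buttons button_presses → Spec_apply_buttons num_lights buttons button_presses (apply_buttons num_lights buttons button_presses)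
def Claim_changed_apply_buttons : Prop := Dom_apply_buttons (pvDiffWitness_apply_buttons.1) (pvDiffWitness_apply_buttons.2.1) (pvDiffWitness_apply_buttons.2.2) ∧ Pre_apply_buttons (pvDiffWitness_apply_buttons.1) (pvDiffWitness_apply_buttons.2.1) (pvDiffWitness_apply_buttons.2.2) ∧ D_apply_buttons (pvDiffWitness_apply_buttons.1) (pvDiffWitness_apply_buttons.2.1) (pvDiffWitness_apply_buttons.2.2) ∧ apply_buttons (pvDiffWitness_apply_buttons.1) (pvDiffWitness_apply_buttons.2.1) (pvDiffWitness_apply_buttons.2.2) = pvDiffWitnessOut_apply_buttons.1 ∧ apply_buttons_alt (pvDiffWitness_apply_buttons.1) (pvDiffWitness_apply_buttons.2.1) (pvDiffWitness_apply_buttons.2.2) = pvDiffWitnessOut_apply_buttons.2 ∧ pvDiffWitnessOut_apply_buttons.1 ≠ pvDiffWitnessOut_apply_buttons.2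

-- ===== LEMMAS AND PROOFS =====

-- invariant: the state list holds the occurrence-count parities of the toggle events seen so far
def pvInv (num_lights : Int) (st : List Int) (tog : List Int) : Prop :=
  st.length = num_lights.toNat ∧
  ∀ j : Nat, j < num_lights.toNat → st.getD j 0 = PySem.Int.mod ((tog.count (j : Int) : Int)) 2

theorem pv_bxor_mod2 (c : Int) :
    PySem.Int.bxor (PySem.Int.mod c 2) 1 = PySem.Int.mod (c + 1) 2 := by
  rw [PySem.Int.mod_eq_emod_of_pos (by omega : (0:Int) < 2), PySem.Int.mod_eq_emod_of_pos (by omega : (0:Int) < 2)]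
  rcases Int.emod_two_eq c with h | h <;> rw [h] <;>
    [skip; skip] <;> first
    | (have h2 : (c + 1) % 2 = 1 := by omega
       rw [h2]; decide)
    | (have h2 : (c + 1) % 2 = 0 := by omega
       rw [h2]; decide)

theorem pv_step_inv (num_lights idx : Int) (st tog : List Int)
    (hInv : pvInv num_lights st tog) (hg : idx < num_lights → 0 ≤ idx) :
    pvInv num_lights (pvStepA num_lights st idx) (tog ++ [idx]) := by
  obtain ⟨hlen, hpt⟩ := hInv
  unfold pvStepA
  by_cases h : idx < num_lights
  · have h0 : 0 ≤ idx := hg h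
    have hlt : idx.toNat < st.length := by omega
    rw [if_pos h, PySem.List.pySetD_of_nonneg _ _ h0,
        PySem.List.pyGetD_eq_getElem _ _ h0 (by omega)]
    refine ⟨by simp [hlen], fun j hj => ?_⟩
    have hjlen : j < st.length := by omega
    by_cases hje : j = idx.toNat
    · subst hje
      rw [List.getD_eq_getElem _ _ (by simpa using hjlen), List.getElem_set_self (by simpa using hjlen),
          ← List.getD_eq_getElem _ 0 hjlen, hpt idx.toNat hj]
      have hci : ((idx.toNat : Nat) : Int) = idx := by omega
      rw [hci]
      have hcnt : (((tog ++ [idx]).count idx : Nat) : Int) = ((tog.count idx : Nat) : Int) + 1 := by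
        simp [List.count_append]
      rw [hcnt, pv_bxor_mod2]
    · have hne : ((j : Nat) : Int) ≠ idx := by omega
      rw [List.getD_eq_getElem _ _ (by simpa using hjlen), List.getElem_set_ne (by omega),
          ← List.getD_eq_getElem _ 0 hjlen, hpt j hj]
      simp [List.count_append, Ne.symm hne]
  · rw [if_neg h]
    refine ⟨hlen, fun j hj => ?_⟩
    have hne : ((j : Nat) : Int) ≠ idx := by omega
    rw [hpt j hj]
    simp [List.count_append, Ne.symm hne]

theorem pv_inner_inv (num_lights : Int) (l : List Int) (st tog : List Int)
    (hInv : pvInv num_lights st tog) (hg : ∀ idx ∈ l, idx < num_lights → 0 ≤ idx) :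
    pvInv num_lights (l.foldl (pvStepA num_lights) st) (tog ++ l) := by
  induction l generalizing st tog with
  | nil => simpa using hInv
  | cons x xs ih =>
    have h1 := pv_step_inv num_lights x st tog hInv (hg x (by simp))
    have h2 := ih _ _ h1 (fun i hi => hg i (by simp [hi]))
    simpa using h2

theorem pv_outer_inv (num_lights : Int) (L : List (List Int × Bool)) (st tog : List Int)
    (hInv : pvInv num_lights st tog)
    (hg : ∀ q ∈ L, q.2 = true → ∀ idx ∈ q.1, idx < num_lights → 0 ≤ idx) :
    pvInv num_lights
      (L.foldl (fun st q => if q.2 then q.1.foldl (pvStepA num_lights) st else st) st)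
      (tog ++ (L.filter (fun q => q.2)).flatMap (fun q => q.1)) := by
  induction L generalizing st tog with
  | nil => simpa using hInv
  | cons q L ih =>
    by_cases hq : q.2 = true
    · have h1 := pv_inner_inv num_lights q.1 st tog hInv (hg q (by simp) hq)
      have h2 := ih _ _ h1 (fun r hr => hg r (by simp [hr]))
      simpa [hq, List.append_assoc] using h2
    · simp only [Bool.not_eq_true] at hq
      have h2 := ih st tog hInv (fun r hr => hg r (by simp [hr]))
      simpa [hq] using h2

theorem pv_reshape (num_lights : Int) (buttons : List (List Int)) (ps : List Bool)
    (k : Nat) (st : List Int)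
    (h : ∀ p ∈ PySem.List.enumerate ps (k : Int), p.2 = true → p.1 < (buttons.length : Int)) :
    (PySem.List.enumerate ps (k : Int)).foldl
      (fun st p => if p.2 then (PySem.List.pyGetD buttons p.1 []).foldl (pvStepA num_lights) st else st) st
    = ((buttons.drop k).zip ps).foldl
      (fun st q => if q.2 then q.1.foldl (pvStepA num_lights) st else st) st := by
  induction ps generalizing k st with
  | nil => simp [PySem.List.enumerate_nil]
  | cons b ps ih =>
    rw [PySem.List.enumerate_cons] at h ⊢
    have hcast : ((k : Int) + 1) = (((k + 1 : Nat)) : Int) := by push_cast; ring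
    by_cases hk : k < buttons.length
    · have hd : buttons.drop k = buttons[k] :: buttons.drop (k + 1) := List.drop_eq_getElem_cons hk
      have hget : PySem.List.pyGetD buttons ((k : Int)) ([] : List Int) = buttons[k] := by
        rw [PySem.List.pyGetD_natCast]
        exact List.getD_eq_getElem _ _ hk
      rw [hd, List.zip_cons_cons, List.foldl_cons, List.foldl_cons]
      simp only [hget]
      rw [hcast]
      exact ih (k + 1) _ (fun p hp hp2 => h p (by rw [hcast]; exact List.mem_cons_of_mem _ hp) hp2)
    · have hd : buttons.drop k = ([] : List (List Int)) := List.drop_eq_nil_of_le (by omega)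
      have hd1 : buttons.drop (k + 1) = ([] : List (List Int)) := List.drop_eq_nil_of_le (by omega)
      cases hb : b with
      | true =>
        exfalso
        have hlt := h ((k : Int), true) (by simp [hb]) rfl
        simp only [Nat.cast_lt] at hlt
        omega
      | false =>
        rw [hd, List.zip_nil_left, List.foldl_nil, List.foldl_cons]
        simp only [Bool.false_eq_true, if_false]
        rw [hcast, ih (k + 1) _ (fun p hp hp2 => h p (by rw [hcast]; exact List.mem_cons_of_mem _ hp) hp2),
            hd1, List.zip_nil_left, List.foldl_nil]

-- ===== VERDICT (by name: the statements are the Claim_ definitions above) =====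
theorem apply_buttons_spec : Claim_unchanged_apply_buttons := by
  intro num_lights buttons button_presses _ hPre hnD
  unfold apply_buttons apply_buttons_alt
  have hre := pv_reshape num_lights buttons button_presses 0 (List.replicate num_lights.toNat 0)
    (by intro p hp hp2; exact (hPre p (by simpa using hp) hp2).1)
  rw [List.drop_zero] at hre
  rw [show ((0 : Nat) : Int) = (0 : Int) from rfl] at hre
  rw [hre]
  have hInv0 : pvInv num_lights (List.replicate num_lights.toNat 0) [] := by
    refine ⟨by simp, fun j hj => ?_⟩
    simp [List.getD, hj]
  have hg : ∀ q ∈ buttons.zip button_presses, q.2 = true →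
      ∀ idx ∈ q.1, idx < num_lights → 0 ≤ idx := by
    intro q hq hq2 idx hidx hlt
    obtain ⟨i, hi, rfl⟩ := List.mem_iff_getElem.mp hq
    rw [List.getElem_zip] at hq2 hidx
    have hib : i < buttons.length := by
      have := hi; rw [List.length_zip] at this; omega
    have hip : i < button_presses.length := by
      have := hi; rw [List.length_zip] at this; omega
    have hmem : ((i : Int), button_presses[i]) ∈ PySem.List.enumerate button_presses 0 := by
      rw [PySem.List.mem_enumerate_iff]
      exact ⟨i, hip, by simp⟩
    have hget' : PySem.List.pyGetD buttons ((i : Int)) ([] : List Int) = buttons[i] := by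
      rw [PySem.List.pyGetD_natCast]
      exact List.getD_eq_getElem _ _ hib
    have hpre := (hPre _ hmem hq2).2
    rw [hget'] at hpre
    have hge : -num_lights ≤ idx := hpre idx hidx hlt
    by_contra hneg
    exact hnD ⟨((i : Int), button_presses[i]), hmem, hq2,
      ⟨idx, by rw [hget']; exact hidx, by omega, hge⟩⟩
  have hfold := pv_outer_inv num_lights (buttons.zip button_presses) _ [] hInv0 hg
  simp only [List.nil_append] at hfold
  obtain ⟨hlen, hpt⟩ := hfold
  apply List.ext_getElem
  · simp [hlen, PySem.List.length_pyRange_one]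
  · intro j h1 h2
    rw [List.getElem_map, PySem.List.getElem_pyRange_one]
    have hj : j < num_lights.toNat := by rwa [hlen] at h1
    rw [← List.getD_eq_getElem _ 0 h1, hpt j hj]
    norm_num [PySem.List.count_eq]

theorem apply_buttons_changed : Claim_changed_apply_buttons := by
  unfold Claim_changed_apply_buttons; decide
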